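-- pv_equiv track=rewrite | github.com/1468019018/fortinet | policy2.0.py | find_user_policies
-- ===== SOURCE A (Python) =====
-- def find_user_policies(user_list, user_policy_map, group_policy_map, group_user_map):
--     # 用于存储结果的字典
--     user_policy_dict = {user: set() for user in user_list}
--
--     # 1. 遍历用户列表，针对每个用户先查询一次【用户-策略表】
--     for policy_str, users in user_policy_map.items():
--         # policy = policy_str.strip('"')  # 去掉引号以匹配逻辑（如果需要）
--         policy = policy_str
--         for user in users:
--             if user in user_policy_dict:
--                 user_policy_dict[user].add(policy)
--
--     # 构建用户到用户组的反向映射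
--     user_to_groups = {}
--     for group, users in group_user_map.items():
--         for user in users:
--             if user not in user_to_groups:
--                 user_to_groups[user] = []
--             user_to_groups[user].append(group)
--     # 构建用户组到策略的反向映射
--     groups_to_policy = {}
--     for policy, groups in group_policy_map.items():
--         for group in groups:
--             if group not in groups_to_policy:
--                 groups_to_policy[group] = []
--             groups_to_policy[group].append(policy)
--
--     # 2. 遍历用户列表，继续通过【用户-用户组表】（反向映射）和【用户组-策略表】查找策略
--     for user in user_list:
--         if user in user_to_groups:
--             user_groups = user_to_groups[user]
--             for group in user_groups:
--                 if group in groups_to_policy: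
--                     # 获取该用户组关联的所有策略
--                     for policy_str in groups_to_policy[group]:
--                         # policy = policy_str.strip('"')  # 去掉引号以匹配逻辑（如果需要）
--                         policy = policy_str
--                         if policy not in user_policy_dict[user]:
--                             user_policy_dict[user].add(policy)
--
--     # 将结果存入字典，使用集合转换为列表（如果需要保持顺序，可以用其他方法）
--     result_dict = {user: sorted(list(policies)) for user, policies in user_policy_dict.items()}  # 排序以便于查看
--
--     return result_dict
-- ===== SOURCE B (Python) =====
-- def find_user_policies(user_list, user_policy_map, group_policy_map, group_user_map):
--     result = {}
--     for user in user_list: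
--         policies = set()
--         for policy, users in user_policy_map.items():
--             if user in users:
--                 policies.add(policy)
--         for group, users in group_user_map.items():
--             if user in users:
--                 for policy, groups in group_policy_map.items():
--                     if group in groups:
--                         policies.add(policy)
--         result[user] = sorted(policies)
--     return result
-- ===== Notes on version B (the rewrite author's own statement) =====
-- stated objective: simpler
-- what changed: B drops A's three precomputed index structures (the per-user set dict mutated across passes and the user-to-groups / group-to-policies reverse maps) and instead builds each user's policy set by direct forward scans of the given maps, emitting the sorted result in a single pass over user_list.
import Mathlib
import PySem

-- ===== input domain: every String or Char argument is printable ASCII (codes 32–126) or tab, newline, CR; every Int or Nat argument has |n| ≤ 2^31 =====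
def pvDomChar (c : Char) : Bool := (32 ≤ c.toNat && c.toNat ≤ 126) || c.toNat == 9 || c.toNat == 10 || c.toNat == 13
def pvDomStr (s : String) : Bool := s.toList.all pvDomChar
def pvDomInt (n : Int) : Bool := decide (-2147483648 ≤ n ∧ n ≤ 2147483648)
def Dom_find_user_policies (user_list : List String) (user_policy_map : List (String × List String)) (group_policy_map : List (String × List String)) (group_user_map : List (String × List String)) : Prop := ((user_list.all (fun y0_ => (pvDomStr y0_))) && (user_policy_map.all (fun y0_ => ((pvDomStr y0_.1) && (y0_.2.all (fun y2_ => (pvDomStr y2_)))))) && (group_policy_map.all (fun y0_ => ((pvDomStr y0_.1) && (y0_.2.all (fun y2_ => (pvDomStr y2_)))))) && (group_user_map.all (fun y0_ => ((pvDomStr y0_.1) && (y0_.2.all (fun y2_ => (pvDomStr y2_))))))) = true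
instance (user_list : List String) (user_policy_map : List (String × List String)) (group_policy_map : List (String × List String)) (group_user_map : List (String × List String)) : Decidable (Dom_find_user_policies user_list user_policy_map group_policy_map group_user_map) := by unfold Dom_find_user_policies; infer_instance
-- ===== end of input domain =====

-- B replaces A's three precomputed index dictionaries (mutated per-user set dict plus user→groups
-- and group→policies reverse maps) with direct forward scans of the given maps for each user;
-- a structurally different decomposition of the same task (objective: simpler, not faster).


-- ===== PORT A =====
def find_user_policies (user_list : List String) (user_policy_map : List (String × List String)) (group_policy_map : List (String × List String)) (group_user_map : List (String × List String)) : List (String × List String) :=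
  -- user_policy_dict = {user: set() for user in user_list}
  let d0 : PySem.Dict String (PySem.Set String) :=
    user_list.foldl (fun d u => d.insert u PySem.Set.empty) PySem.Dict.empty
  -- 1. for policy_str, users in user_policy_map.items(): …
  let d1 :=
    (PySem.Dict.ofList user_policy_map).items.foldl (fun d pr =>
      pr.2.foldl (fun d u =>
        if d.contains u then d.modify u PySem.Set.empty (fun s => PySem.Set.add s pr.1) else d) d)
      d0
  -- user_to_groups built from group_user_map
  let user_to_groups : PySem.Dict String (List String) :=
    (PySem.Dict.ofList group_user_map).items.foldl (fun d pr =>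
      pr.2.foldl (fun d u =>
        (if d.contains u then d else d.insert u []).modify u [] (fun l => l ++ [pr.1])) d)
      PySem.Dict.empty
  -- groups_to_policy built from group_policy_map
  let groups_to_policy : PySem.Dict String (List String) :=
    (PySem.Dict.ofList group_policy_map).items.foldl (fun d pr =>
      pr.2.foldl (fun d g =>
        (if d.contains g then d else d.insert g []).modify g [] (fun l => l ++ [pr.1])) d)
      PySem.Dict.empty
  -- 2. for user in user_list: …
  let d2 :=
    user_list.foldl (fun d u =>
      if user_to_groups.contains u then
        (user_to_groups.getD u []).foldl (fun d g =>
          if groups_to_policy.contains g then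
            (groups_to_policy.getD g []).foldl (fun d p =>
              if !(PySem.Set.contains (d.getD u PySem.Set.empty) p) then
                d.modify u PySem.Set.empty (fun s => PySem.Set.add s p)
              else d) d
          else d) d
      else d)
      d1
  -- result_dict = {user: sorted(list(policies)) for user, policies in user_policy_dict.items()}
  d2.items.map (fun pr => (pr.1, PySem.List.sorted pr.2 (fun x => x) false))

-- ===== PORT B =====
def find_user_policies_alt (user_list : List String) (user_policy_map : List (String × List String)) (group_policy_map : List (String × List String)) (group_user_map : List (String × List String)) : List (String × List String) :=
  (user_list.foldl (fun (result : PySem.Dict String (List String)) user =>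
      result.insert user (PySem.List.sorted
        ((PySem.Dict.ofList group_user_map).items.foldl (fun s gr =>
            if user ∈ gr.2 then
              (PySem.Dict.ofList group_policy_map).items.foldl (fun s pp =>
                if gr.1 ∈ pp.2 then PySem.Set.add s pp.1 else s) s
            else s)
          ((PySem.Dict.ofList user_policy_map).items.foldl (fun s pr =>
              if user ∈ pr.2 then PySem.Set.add s pr.1 else s) PySem.Set.empty))
        (fun x => x) false))
    PySem.Dict.empty).items

-- ===== PRECONDITION & SPEC =====
def Spec_find_user_policies (user_list : List String) (user_policy_map : List (String × List String)) (group_policy_map : List (String × List String)) (group_user_map : List (String × List String)) (out : List (String × List String)) : Prop := out = find_user_policies_alt user_list user_policy_map group_policy_map group_user_map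
instance (user_list : List String) (user_policy_map : List (String × List String)) (group_policy_map : List (String × List String)) (group_user_map : List (String × List String)) (out : List (String × List String)) : Decidable (Spec_find_user_policies user_list user_policy_map group_policy_map group_user_map out) := by unfold Spec_find_user_policies; infer_instance

-- ===== CLAIM (what is proved, stated in full; the proofs are below) =====
def Claim_equal_find_user_policies : Prop := ∀ (user_list : List String) (user_policy_map : List (String × List String)) (group_policy_map : List (String × List String)) (group_user_map : List (String × List String)), Dom_find_user_policies user_list user_policy_map group_policy_map group_user_map → Spec_find_user_policies user_list user_policy_map group_policy_map group_user_map (find_user_policies user_list user_policy_map group_policy_map group_user_map)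

-- ===== LEMMAS AND PROOFS =====
-- ===== proof-side helpers: the phases of port A, named =====
def pvPhase1 (ul : List String) : PySem.Dict String (PySem.Set String) :=
  ul.foldl (fun d u => d.insert u PySem.Set.empty) PySem.Dict.empty

def pvPhase2 (U : List (String × List String)) (d : PySem.Dict String (PySem.Set String)) :
    PySem.Dict String (PySem.Set String) :=
  U.foldl (fun d pr =>
    pr.2.foldl (fun d u =>
      if d.contains u then d.modify u PySem.Set.empty (fun s => PySem.Set.add s pr.1) else d) d) d

def pvRevmap (L : List (String × List String)) : PySem.Dict String (List String) :=
  L.foldl (fun d pr =>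
    pr.2.foldl (fun d x =>
      (if d.contains x then d else d.insert x []).modify x [] (fun l => l ++ [pr.1])) d)
    PySem.Dict.empty

def pvPhase5 (ul : List String) (r q : PySem.Dict String (List String))
    (d : PySem.Dict String (PySem.Set String)) : PySem.Dict String (PySem.Set String) :=
  ul.foldl (fun d u =>
    if r.contains u then
      (r.getD u []).foldl (fun d g =>
        if q.contains g then
          (q.getD g []).foldl (fun d p =>
            if !(PySem.Set.contains (d.getD u PySem.Set.empty) p) then
              d.modify u PySem.Set.empty (fun s => PySem.Set.add s p)
            else d) d
        else d) d
    else d) d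

theorem A_eq (ul : List String) (upm gpm gum : List (String × List String)) :
    find_user_policies ul upm gpm gum =
      (pvPhase5 ul (pvRevmap (PySem.Dict.ofList gum).items) (pvRevmap (PySem.Dict.ofList gpm).items)
        (pvPhase2 (PySem.Dict.ofList upm).items (pvPhase1 ul))).items.map
        (fun pr => (pr.1, PySem.List.sorted pr.2 (fun x => x) false)) := rfl

def pvBVal (upm gpm gum : List (String × List String)) (user : String) : List String :=
  PySem.List.sorted
    ((PySem.Dict.ofList gum).items.foldl (fun s gr =>
        if user ∈ gr.2 then
          (PySem.Dict.ofList gpm).items.foldl (fun s pp =>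
            if gr.1 ∈ pp.2 then PySem.Set.add s pp.1 else s) s
        else s)
      ((PySem.Dict.ofList upm).items.foldl (fun s pr =>
          if user ∈ pr.2 then PySem.Set.add s pr.1 else s) PySem.Set.empty))
    (fun x => x) false

theorem B_eq (ul : List String) (upm gpm gum : List (String × List String)) :
    find_user_policies_alt ul upm gpm gum =
      (ul.foldl (fun r u => r.insert u (pvBVal upm gpm gum u)) PySem.Dict.empty).items := rfl


-- generic small facts
theorem pv_keys_modify_of_contains {ν : Type} (d : PySem.Dict String ν) (k : String) (d0 : ν)
    (f : ν → ν) (h : d.contains k = true) : (d.modify k d0 f).keys = d.keys := by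
  rw [PySem.Dict.keys_modify, PySem.Dict.keys_insert_of_contains _ _ h]

theorem pv_contains_of_keys_eq {ν ν' : Type} (d : PySem.Dict String ν) (d' : PySem.Dict String ν')
    (h : d'.keys = d.keys) (k : String) : d'.contains k = d.contains k := by
  rw [PySem.Dict.contains_eq_decide_mem_keys, PySem.Dict.contains_eq_decide_mem_keys, h]

theorem pv_add_idem (s : PySem.Set String) (x : String) :
    (s.add x).add x = s.add x := PySem.Set.add_of_mem ((PySem.Set.mem_add s x x).2 (Or.inr rfl))

-- ===== phase 1 =====
theorem pvPhase1_keys (ul : List String) : (pvPhase1 ul).keys = PySem.Set.ofList ul := by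
  unfold pvPhase1
  rw [PySem.Dict.keys_foldl_insert (f := fun _ _ => PySem.Set.empty), PySem.Dict.keys_empty,
    PySem.Set.update_nil_left]

theorem pvPhase1_getD_aux (ul : List String) (d : PySem.Dict String (PySem.Set String)) (k : String)
    (h : d.getD k PySem.Set.empty = PySem.Set.empty) :
    (ul.foldl (fun d u => d.insert u PySem.Set.empty) d).getD k PySem.Set.empty = PySem.Set.empty := by
  induction ul generalizing d with
  | nil => exact h
  | cons u tl ih =>
      refine ih _ ?_
      rw [PySem.Dict.getD_insert]
      split <;> [rfl; exact h]

theorem pvPhase1_getD (ul : List String) (k : String) :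
    (pvPhase1 ul).getD k PySem.Set.empty = PySem.Set.empty :=
  pvPhase1_getD_aux ul _ k (PySem.Dict.getD_empty _ _)

-- ===== phase 2 =====
theorem p2i_keys (us : List String) (pol : String) (d : PySem.Dict String (PySem.Set String)) :
    (us.foldl (fun d u =>
      if d.contains u then d.modify u PySem.Set.empty (fun s => PySem.Set.add s pol) else d) d).keys
      = d.keys := by
  induction us generalizing d with
  | nil => rfl
  | cons u tl ih =>
      simp only [List.foldl_cons]
      by_cases hc : d.contains u = true
      · rw [if_pos hc, ih, pv_keys_modify_of_contains _ _ _ _ hc]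
      · rw [if_neg hc, ih]

theorem p2i_getD (us : List String) (pol : String) (d : PySem.Dict String (PySem.Set String)) (k : String) :
    (us.foldl (fun d u =>
      if d.contains u then d.modify u PySem.Set.empty (fun s => PySem.Set.add s pol) else d) d).getD k PySem.Set.empty
      = if k ∈ us ∧ d.contains k = true then (d.getD k PySem.Set.empty).add pol
        else d.getD k PySem.Set.empty := by
  induction us generalizing d with
  | nil => simp
  | cons u tl ih =>
      simp only [List.foldl_cons]
      by_cases hc : d.contains u = true
      · rw [if_pos hc, ih]
        have hck : (d.modify u PySem.Set.empty (fun s => PySem.Set.add s pol)).contains k = d.contains k := by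
          exact pv_contains_of_keys_eq _ _ (pv_keys_modify_of_contains _ _ _ _ hc) k
        rw [hck, PySem.Dict.getD_modify]
        by_cases hk : k = u
        · subst hk
          simp only [List.mem_cons, true_or, hc, and_true, if_pos True.intro]
          by_cases hm : k ∈ tl
          · rw [if_pos hm, pv_add_idem]
          · rw [if_neg hm]
        · rw [if_neg hk]
          by_cases hm : k ∈ tl
          · simp [hm, hk]
          · simp [hm, hk]
      · rw [if_neg hc, ih]
        by_cases hk : k = u
        · subst hk
          simp [hc]
        · simp [hk]

theorem p2_keys (U : List (String × List String)) (d : PySem.Dict String (PySem.Set String)) :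
    (pvPhase2 U d).keys = d.keys := by
  induction U generalizing d with
  | nil => rfl
  | cons pr tl ih =>
      unfold pvPhase2 at *
      simp only [List.foldl_cons]
      rw [ih, p2i_keys]

theorem p2_getD_mem (U : List (String × List String)) (d : PySem.Dict String (PySem.Set String))
    (k : String) (y : String) :
    y ∈ (pvPhase2 U d).getD k PySem.Set.empty ↔
      y ∈ d.getD k PySem.Set.empty ∨
        (d.contains k = true ∧ ∃ pr ∈ U, k ∈ pr.2 ∧ y = pr.1) := by
  induction U generalizing d with
  | nil => simp [pvPhase2]
  | cons pr tl ih =>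
      unfold pvPhase2 at *
      simp only [List.foldl_cons]
      rw [ih]
      have hck := pv_contains_of_keys_eq _ _ (p2i_keys pr.2 pr.1 d) k
      rw [hck, p2i_getD]
      by_cases hc : d.contains k = true
      · by_cases hm : k ∈ pr.2
        · rw [if_pos ⟨hm, hc⟩]
          simp only [PySem.Set.mem_add, List.mem_cons, hc, true_and]
          constructor
          · rintro ((h | h) | h)
            · exact Or.inl h
            · exact Or.inr ⟨pr, Or.inl rfl, hm, h⟩
            · rcases h with ⟨q, hq, h1, h2⟩; exact Or.inr ⟨q, Or.inr hq, h1, h2⟩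
          · rintro (h | ⟨q, (rfl | hq), h1, h2⟩)
            · exact Or.inl (Or.inl h)
            · exact Or.inl (Or.inr h2)
            · exact Or.inr ⟨q, hq, h1, h2⟩
        · rw [if_neg (by simp [hm])]
          simp only [hc, true_and, List.mem_cons]
          constructor
          · rintro (h | ⟨q, hq, h1, h2⟩)
            · exact Or.inl h
            · exact Or.inr ⟨q, Or.inr hq, h1, h2⟩
          · rintro (h | ⟨q, (rfl | hq), h1, h2⟩)
            · exact Or.inl h
            · exact absurd h1 hm
            · exact Or.inr ⟨q, hq, h1, h2⟩
      · rw [if_neg (by simp [hc])]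
        simp [hc]

theorem p2_getD_nodup (U : List (String × List String)) (d : PySem.Dict String (PySem.Set String))
    (k : String) (h : (d.getD k PySem.Set.empty).Nodup) :
    ((pvPhase2 U d).getD k PySem.Set.empty).Nodup := by
  induction U generalizing d with
  | nil => exact h
  | cons pr tl ih =>
      unfold pvPhase2 at *
      simp only [List.foldl_cons]
      refine ih _ ?_
      rw [p2i_getD]
      split
      · exact PySem.Set.nodup_add _ _ h
      · exact h

-- ===== reverse maps (pvRevmap) =====
theorem pv_setdefault_modify (d : PySem.Dict String (List String)) (x : String) (f : List String → List String) :
    (if d.contains x then d else d.insert x []).modify x [] f = d.modify x [] f := by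
  by_cases hc : d.contains x = true
  · rw [if_pos hc]
  · rw [if_neg hc]
    show (d.insert x []).insert x (f ((d.insert x []).getD x [])) = d.insert x (f (d.getD x []))
    rw [PySem.Dict.insert_insert_self, PySem.Dict.getD_insert, if_pos rfl,
      PySem.Dict.getD_of_not_contains _ _ (by simpa using hc)]

theorem pvRevmap_eq_flat (L : List (String × List String)) :
    pvRevmap L =
      (L.flatMap (fun pr => pr.2.map (fun x => (x, pr.1)))).foldl
        (fun d p => d.modify p.1 [] (fun l => l ++ [p.2])) PySem.Dict.empty := by
  unfold pvRevmap
  generalize PySem.Dict.empty = d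
  induction L generalizing d with
  | nil => rfl
  | cons pr tl ih =>
      simp only [List.foldl_cons, List.flatMap_cons, List.foldl_append, List.foldl_map]
      rw [← ih]
      congr 1
      induction pr.2 generalizing d with
      | nil => rfl
      | cons x xs ih2 =>
          simp only [List.foldl_cons]
          rw [pv_setdefault_modify, ih2]

theorem pvRevmap_getD (L : List (String × List String)) (u : String) :
    (pvRevmap L).getD u [] =
      ((L.flatMap (fun pr => pr.2.map (fun x => (x, pr.1)))).filter (fun p => p.1 == u)).map (fun p => p.2) := by
  rw [pvRevmap_eq_flat, PySem.Dict.getD_foldl_modify_append, PySem.Dict.getD_empty]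
  rfl

theorem pv_mem_revmap (L : List (String × List String)) (u g : String) :
    g ∈ (pvRevmap L).getD u [] ↔ ∃ pr ∈ L, u ∈ pr.2 ∧ g = pr.1 := by
  rw [pvRevmap_getD]
  simp only [List.mem_map, List.mem_filter, List.mem_flatMap, beq_iff_eq]
  constructor
  · rintro ⟨p, ⟨⟨pr, hpr, ⟨x, hxm, rfl⟩⟩, hu⟩, hg⟩
    exact ⟨pr, hpr, by simpa [← hu] using hxm, hg.symm⟩
  · rintro ⟨pr, hpr, hu, rfl⟩
    exact ⟨(u, pr.1), ⟨⟨pr, hpr, ⟨u, hu, rfl⟩⟩, rfl⟩, rfl⟩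

-- ===== phase 5 =====
theorem p5p_keys (pl : List String) (u : String) (d : PySem.Dict String (PySem.Set String))
    (hu : d.contains u = true) :
    (pl.foldl (fun d p =>
      if !(PySem.Set.contains (d.getD u PySem.Set.empty) p) then
        d.modify u PySem.Set.empty (fun s => PySem.Set.add s p)
      else d) d).keys = d.keys := by
  induction pl generalizing d with
  | nil => rfl
  | cons p tl ih =>
      simp only [List.foldl_cons]
      cases hm : PySem.Set.contains (d.getD u PySem.Set.empty) p with
      | true => rw [if_neg (by simp), ih _ hu]
      | false =>
        rw [if_pos (show (!false) = true from rfl)]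
        have hkeys := pv_keys_modify_of_contains d u PySem.Set.empty
          (fun s => PySem.Set.add s p) hu
        rw [ih _ (by rw [pv_contains_of_keys_eq _ _ hkeys u]; exact hu), hkeys]

theorem p5p_getD_self (pl : List String) (u : String) (d : PySem.Dict String (PySem.Set String)) :
    (pl.foldl (fun d p =>
      if !(PySem.Set.contains (d.getD u PySem.Set.empty) p) then
        d.modify u PySem.Set.empty (fun s => PySem.Set.add s p)
      else d) d).getD u PySem.Set.empty = (d.getD u PySem.Set.empty).update pl := by
  induction pl generalizing d with
  | nil => rfl
  | cons p tl ih =>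
      simp only [List.foldl_cons, PySem.Set.update_cons]
      cases hm : PySem.Set.contains (d.getD u PySem.Set.empty) p with
      | true =>
        rw [if_neg (by simp), ih,
          PySem.Set.add_of_mem ((PySem.Set.contains_iff _ _).1 hm)]
      | false => rw [if_pos (show (!false) = true from rfl), ih, PySem.Dict.getD_modify, if_pos rfl]

theorem p5p_getD_ne (pl : List String) (u : String) (d : PySem.Dict String (PySem.Set String))
    (k : String) (hk : k ≠ u) :
    (pl.foldl (fun d p =>
      if !(PySem.Set.contains (d.getD u PySem.Set.empty) p) then
        d.modify u PySem.Set.empty (fun s => PySem.Set.add s p)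
      else d) d).getD k PySem.Set.empty = d.getD k PySem.Set.empty := by
  induction pl generalizing d with
  | nil => rfl
  | cons p tl ih =>
      simp only [List.foldl_cons]
      cases hm : PySem.Set.contains (d.getD u PySem.Set.empty) p with
      | true => rw [if_neg (by simp), ih]
      | false => rw [if_pos (show (!false) = true from rfl), ih, PySem.Dict.getD_modify, if_neg hk]

theorem p5g_keys (gl : List String) (u : String) (q : PySem.Dict String (List String))
    (d : PySem.Dict String (PySem.Set String)) (hu : d.contains u = true) :
    (gl.foldl (fun d g =>
      if q.contains g then
        (q.getD g []).foldl (fun d p =>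
          if !(PySem.Set.contains (d.getD u PySem.Set.empty) p) then
            d.modify u PySem.Set.empty (fun s => PySem.Set.add s p)
          else d) d
      else d) d).keys = d.keys := by
  induction gl generalizing d with
  | nil => rfl
  | cons g tl ih =>
      simp only [List.foldl_cons]
      by_cases hc : q.contains g = true
      · rw [if_pos hc]
        have hkeys := p5p_keys (q.getD g []) u d hu
        rw [ih _ (by rw [pv_contains_of_keys_eq _ _ hkeys u]; exact hu), hkeys]
      · rw [if_neg hc, ih _ hu]

theorem p5g_getD_self_mem (gl : List String) (u : String) (q : PySem.Dict String (List String))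
    (d : PySem.Dict String (PySem.Set String)) (hu : d.contains u = true) (y : String) :
    y ∈ (gl.foldl (fun d g =>
      if q.contains g then
        (q.getD g []).foldl (fun d p =>
          if !(PySem.Set.contains (d.getD u PySem.Set.empty) p) then
            d.modify u PySem.Set.empty (fun s => PySem.Set.add s p)
          else d) d
      else d) d).getD u PySem.Set.empty ↔
      y ∈ d.getD u PySem.Set.empty ∨ ∃ g ∈ gl, y ∈ q.getD g [] := by
  induction gl generalizing d with
  | nil => simp
  | cons g tl ih =>
      simp only [List.foldl_cons]
      by_cases hc : q.contains g = true
      · rw [if_pos hc]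
        have hkeys := p5p_keys (q.getD g []) u d hu
        rw [ih _ (by rw [pv_contains_of_keys_eq _ _ hkeys u]; exact hu),
          p5p_getD_self, PySem.Set.mem_update]
        constructor
        · rintro ((h | h) | ⟨g', hg', h⟩)
          · exact Or.inl h
          · exact Or.inr ⟨g, List.mem_cons_self, h⟩
          · exact Or.inr ⟨g', List.mem_cons_of_mem _ hg', h⟩
        · rintro (h | ⟨g', hg', h⟩)
          · exact Or.inl (Or.inl h)
          · rcases List.mem_cons.1 hg' with rfl | hg'
            · exact Or.inl (Or.inr h)
            · exact Or.inr ⟨g', hg', h⟩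
      · rw [if_neg hc, ih _ hu]
        have hempty : q.getD g [] = [] := PySem.Dict.getD_of_not_contains _ _ (by simpa using hc)
        constructor
        · rintro (h | ⟨g', hg', h⟩)
          · exact Or.inl h
          · exact Or.inr ⟨g', List.mem_cons_of_mem _ hg', h⟩
        · rintro (h | ⟨g', hg', h⟩)
          · exact Or.inl h
          · rcases List.mem_cons.1 hg' with rfl | hg'
            · rw [hempty] at h; exact absurd h (List.not_mem_nil)
            · exact Or.inr ⟨g', hg', h⟩

theorem p5g_getD_ne (gl : List String) (u : String) (q : PySem.Dict String (List String))
    (d : PySem.Dict String (PySem.Set String)) (k : String) (hk : k ≠ u) :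
    (gl.foldl (fun d g =>
      if q.contains g then
        (q.getD g []).foldl (fun d p =>
          if !(PySem.Set.contains (d.getD u PySem.Set.empty) p) then
            d.modify u PySem.Set.empty (fun s => PySem.Set.add s p)
          else d) d
      else d) d).getD k PySem.Set.empty = d.getD k PySem.Set.empty := by
  induction gl generalizing d with
  | nil => rfl
  | cons g tl ih =>
      simp only [List.foldl_cons]
      by_cases hc : q.contains g = true
      · rw [if_pos hc, ih, p5p_getD_ne _ _ _ _ hk]
      · rw [if_neg hc, ih]

theorem p5g_nodup (gl : List String) (u : String) (q : PySem.Dict String (List String))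
    (d : PySem.Dict String (PySem.Set String)) (hu : d.contains u = true)
    (h : (d.getD u PySem.Set.empty).Nodup) :
    ((gl.foldl (fun d g =>
      if q.contains g then
        (q.getD g []).foldl (fun d p =>
          if !(PySem.Set.contains (d.getD u PySem.Set.empty) p) then
            d.modify u PySem.Set.empty (fun s => PySem.Set.add s p)
          else d) d
      else d) d).getD u PySem.Set.empty).Nodup := by
  induction gl generalizing d with
  | nil => exact h
  | cons g tl ih =>
      simp only [List.foldl_cons]
      by_cases hc : q.contains g = true
      · rw [if_pos hc]
        have hkeys := p5p_keys (q.getD g []) u d hu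
        refine ih _ (by rw [pv_contains_of_keys_eq _ _ hkeys u]; exact hu) ?_
        rw [p5p_getD_self]
        exact PySem.Set.nodup_update _ _ h
      · rw [if_neg hc]
        exact ih _ hu h

theorem p5_keys (ul : List String) (r q : PySem.Dict String (List String))
    (d : PySem.Dict String (PySem.Set String)) (hu : ∀ u ∈ ul, d.contains u = true) :
    (pvPhase5 ul r q d).keys = d.keys := by
  induction ul generalizing d with
  | nil => rfl
  | cons u tl ih =>
      unfold pvPhase5 at *
      simp only [List.foldl_cons]
      by_cases hr : r.contains u = true
      · rw [if_pos hr]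
        have hkeys := p5g_keys (r.getD u []) u q d (hu u List.mem_cons_self)
        rw [ih _ (fun v hv => by
          rw [pv_contains_of_keys_eq _ _ hkeys v]; exact hu v (List.mem_cons_of_mem _ hv)), hkeys]
      · rw [if_neg hr]
        exact ih _ (fun v hv => hu v (List.mem_cons_of_mem _ hv))

theorem p5_getD_mem (ul : List String) (r q : PySem.Dict String (List String))
    (d : PySem.Dict String (PySem.Set String)) (k : String)
    (hu : ∀ u ∈ ul, d.contains u = true) (y : String) :
    y ∈ (pvPhase5 ul r q d).getD k PySem.Set.empty ↔
      y ∈ d.getD k PySem.Set.empty ∨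
        (k ∈ ul ∧ ∃ g ∈ r.getD k [], y ∈ q.getD g []) := by
  induction ul generalizing d with
  | nil => simp [pvPhase5]
  | cons u tl ih =>
      unfold pvPhase5 at *
      simp only [List.foldl_cons]
      by_cases hr : r.contains u = true
      · rw [if_pos hr]
        have hcu := hu u List.mem_cons_self
        have hkeys := p5g_keys (r.getD u []) u q d hcu
        rw [ih _ (fun v hv => by
          rw [pv_contains_of_keys_eq _ _ hkeys v]; exact hu v (List.mem_cons_of_mem _ hv))]
        by_cases hk : k = u
        · subst hk
          rw [p5g_getD_self_mem _ _ _ _ hcu]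
          simp only [List.mem_cons, true_or, true_and]
          constructor
          · rintro ((h | h) | ⟨_, h⟩)
            · exact Or.inl h
            · exact Or.inr h
            · exact Or.inr h
          · rintro (h | h)
            · exact Or.inl (Or.inl h)
            · exact Or.inl (Or.inr h)
        · rw [p5g_getD_ne _ _ _ _ _ hk]
          simp only [List.mem_cons]
          constructor
          · rintro (h | ⟨hm, hg⟩)
            · exact Or.inl h
            · exact Or.inr ⟨Or.inr hm, hg⟩
          · rintro (h | ⟨hm, hg⟩)
            · exact Or.inl h
            · rcases hm with rfl | hm
              · exact absurd rfl hk
              · exact Or.inr ⟨hm, hg⟩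
      · rw [if_neg hr]
        rw [ih _ (fun v hv => hu v (List.mem_cons_of_mem _ hv))]
        have hempty : r.getD u [] = [] := PySem.Dict.getD_of_not_contains _ _ (by simpa using hr)
        constructor
        · rintro (h | ⟨hm, hg⟩)
          · exact Or.inl h
          · exact Or.inr ⟨List.mem_cons_of_mem _ hm, hg⟩
        · rintro (h | ⟨hm, hg⟩)
          · exact Or.inl h
          · rcases List.mem_cons.1 hm with rfl | hm
            · rw [hempty] at hg; simp at hg
            · exact Or.inr ⟨hm, hg⟩

theorem p5_nodup (ul : List String) (r q : PySem.Dict String (List String))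
    (d : PySem.Dict String (PySem.Set String)) (k : String)
    (hu : ∀ u ∈ ul, d.contains u = true)
    (h : (d.getD k PySem.Set.empty).Nodup) :
    ((pvPhase5 ul r q d).getD k PySem.Set.empty).Nodup := by
  induction ul generalizing d with
  | nil => exact h
  | cons u tl ih =>
      unfold pvPhase5 at *
      simp only [List.foldl_cons]
      by_cases hr : r.contains u = true
      · rw [if_pos hr]
        have hcu := hu u List.mem_cons_self
        have hkeys := p5g_keys (r.getD u []) u q d hcu
        refine ih _ (fun v hv => by
          rw [pv_contains_of_keys_eq _ _ hkeys v]; exact hu v (List.mem_cons_of_mem _ hv)) ?_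
        by_cases hk : k = u
        · subst hk; exact p5g_nodup _ _ _ _ hcu h
        · rw [p5g_getD_ne _ _ _ _ _ hk]; exact h
      · rw [if_neg hr]
        exact ih _ (fun v hv => hu v (List.mem_cons_of_mem _ hv)) h

-- ===== B side =====
theorem b_mem_foldl_addIf (l : List (String × List String)) (u : String)
    (s : PySem.Set String) (y : String) :
    y ∈ l.foldl (fun s pr => if u ∈ pr.2 then PySem.Set.add s pr.1 else s) s ↔
      y ∈ s ∨ ∃ pr ∈ l, u ∈ pr.2 ∧ y = pr.1 := by
  induction l generalizing s with
  | nil => simp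
  | cons pr tl ih =>
      simp only [List.foldl_cons]
      rw [ih]
      by_cases hm : u ∈ pr.2
      · rw [if_pos hm]
        simp only [PySem.Set.mem_add, List.mem_cons]
        constructor
        · rintro ((h | h) | ⟨q, hq, h1, h2⟩)
          · exact Or.inl h
          · exact Or.inr ⟨pr, Or.inl rfl, hm, h⟩
          · exact Or.inr ⟨q, Or.inr hq, h1, h2⟩
        · rintro (h | ⟨q, (rfl | hq), h1, h2⟩)
          · exact Or.inl (Or.inl h)
          · exact Or.inl (Or.inr h2)
          · exact Or.inr ⟨q, hq, h1, h2⟩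
      · rw [if_neg hm]
        constructor
        · rintro (h | ⟨q, hq, h1, h2⟩)
          · exact Or.inl h
          · exact Or.inr ⟨q, List.mem_cons_of_mem _ hq, h1, h2⟩
        · rintro (h | ⟨q, hq, h1, h2⟩)
          · exact Or.inl h
          · rcases List.mem_cons.1 hq with rfl | hq
            · exact absurd h1 hm
            · exact Or.inr ⟨q, hq, h1, h2⟩

theorem b_nodup_foldl_addIf (l : List (String × List String)) (u : String)
    (s : PySem.Set String) (h : s.Nodup) :
    (l.foldl (fun s pr => if u ∈ pr.2 then PySem.Set.add s pr.1 else s) s).Nodup := by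
  induction l generalizing s with
  | nil => exact h
  | cons pr tl ih =>
      simp only [List.foldl_cons]
      by_cases hm : u ∈ pr.2
      · rw [if_pos hm]; exact ih _ (PySem.Set.nodup_add _ _ h)
      · rw [if_neg hm]; exact ih _ h

theorem b_mem_groups (G P2 : List (String × List String)) (u : String)
    (s : PySem.Set String) (y : String) :
    y ∈ G.foldl (fun s gr =>
        if u ∈ gr.2 then
          P2.foldl (fun s pp => if gr.1 ∈ pp.2 then PySem.Set.add s pp.1 else s) s
        else s) s ↔
      y ∈ s ∨ ∃ gr ∈ G, u ∈ gr.2 ∧ ∃ pp ∈ P2, gr.1 ∈ pp.2 ∧ y = pp.1 := by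
  induction G generalizing s with
  | nil => simp
  | cons gr tl ih =>
      simp only [List.foldl_cons]
      rw [ih]
      by_cases hm : u ∈ gr.2
      · rw [if_pos hm, b_mem_foldl_addIf]
        constructor
        · rintro ((h | h) | ⟨q, hq, h1, h2⟩)
          · exact Or.inl h
          · exact Or.inr ⟨gr, List.mem_cons_self, hm, h⟩
          · exact Or.inr ⟨q, List.mem_cons_of_mem _ hq, h1, h2⟩
        · rintro (h | ⟨q, hq, h1, h2⟩)
          · exact Or.inl (Or.inl h)
          · rcases List.mem_cons.1 hq with rfl | hq
            · exact Or.inl (Or.inr h2)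
            · exact Or.inr ⟨q, hq, h1, h2⟩
      · rw [if_neg hm]
        constructor
        · rintro (h | ⟨q, hq, h1, h2⟩)
          · exact Or.inl h
          · exact Or.inr ⟨q, List.mem_cons_of_mem _ hq, h1, h2⟩
        · rintro (h | ⟨q, hq, h1, h2⟩)
          · exact Or.inl h
          · rcases List.mem_cons.1 hq with rfl | hq
            · exact absurd h1 hm
            · exact Or.inr ⟨q, hq, h1, h2⟩

theorem b_nodup_groups (G P2 : List (String × List String)) (u : String)
    (s : PySem.Set String) (h : s.Nodup) :
    (G.foldl (fun s gr =>
        if u ∈ gr.2 then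
          P2.foldl (fun s pp => if gr.1 ∈ pp.2 then PySem.Set.add s pp.1 else s) s
        else s) s).Nodup := by
  induction G generalizing s with
  | nil => exact h
  | cons gr tl ih =>
      simp only [List.foldl_cons]
      by_cases hm : u ∈ gr.2
      · rw [if_pos hm]
        refine ih _ ?_
        -- inner fold preserves Nodup
        clear ih
        induction P2 generalizing s with
        | nil => exact h
        | cons pp tl2 ih2 =>
            simp only [List.foldl_cons]
            by_cases hg : gr.1 ∈ pp.2
            · rw [if_pos hg]; exact ih2 _ (PySem.Set.nodup_add _ _ h)
            · rw [if_neg hg]; exact ih2 _ h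
      · rw [if_neg hm]; exact ih _ h

theorem b_fold_keys (ul : List String) (V : String → List String)
    (d : PySem.Dict String (List String)) :
    (ul.foldl (fun r u => r.insert u (V u)) d).keys = PySem.Set.update d.keys ul :=
  PySem.Dict.keys_foldl_insert ul (fun _ u => V u) d

theorem b_fold_getD (ul : List String) (V : String → List String)
    (d : PySem.Dict String (List String)) (k : String) :
    (ul.foldl (fun r u => r.insert u (V u)) d).getD k [] =
      if k ∈ ul then V k else d.getD k [] := by
  induction ul generalizing d with
  | nil => simp
  | cons u tl ih =>
      simp only [List.foldl_cons]
      rw [ih, PySem.Dict.getD_insert]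
      by_cases hm : k ∈ tl
      · simp [hm]
      · by_cases hk : k = u
        · subst hk; simp [hm]
        · simp [hm, hk]

-- ===== VERDICT (by name: the statement is the Claim_ definition above) =====
theorem find_user_policies_spec : Claim_equal_find_user_policies := by
  unfold Claim_equal_find_user_policies
  intro ul upm gpm gum _
  show find_user_policies ul upm gpm gum = find_user_policies_alt ul upm gpm gum
  rw [A_eq, B_eq]
  -- keys facts for the A-side dict
  have hk2 : (pvPhase2 (PySem.Dict.ofList upm).items (pvPhase1 ul)).keys = PySem.Set.ofList ul := by
    rw [p2_keys, pvPhase1_keys]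
  have hc2 : ∀ u ∈ ul, (pvPhase2 (PySem.Dict.ofList upm).items (pvPhase1 ul)).contains u = true := by
    intro u hu
    rw [PySem.Dict.contains_eq_decide_mem_keys, hk2]
    simpa [PySem.Set.mem_ofList] using hu
  have hk5 : (pvPhase5 ul (pvRevmap (PySem.Dict.ofList gum).items)
      (pvRevmap (PySem.Dict.ofList gpm).items)
      (pvPhase2 (PySem.Dict.ofList upm).items (pvPhase1 ul))).keys = PySem.Set.ofList ul := by
    rw [p5_keys _ _ _ _ hc2, hk2]
  -- B-side dict keys
  have hkB : (ul.foldl (fun r u => r.insert u (pvBVal upm gpm gum u)) PySem.Dict.empty).keys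
      = PySem.Set.ofList ul := by
    rw [b_fold_keys, PySem.Dict.keys_empty, PySem.Set.update_nil_left]
  -- items as maps over keys
  have hAitems := PySem.Dict.items_eq_map_keys
    (pvPhase5 ul (pvRevmap (PySem.Dict.ofList gum).items)
      (pvRevmap (PySem.Dict.ofList gpm).items)
      (pvPhase2 (PySem.Dict.ofList upm).items (pvPhase1 ul)))
    (by rw [hk5]; exact PySem.Set.nodup_ofList ul) PySem.Set.empty
  have hBitems := PySem.Dict.items_eq_map_keys
    (ul.foldl (fun r u => r.insert u (pvBVal upm gpm gum u)) PySem.Dict.empty)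
    (by rw [hkB]; exact PySem.Set.nodup_ofList ul) ([] : List String)
  rw [hAitems, hk5, List.map_map, hBitems, hkB]
  refine List.map_congr_left (fun u hu => ?_)
  have hul : u ∈ ul := (PySem.Set.mem_ofList ul u).1 hu
  simp only [Function.comp_apply]
  rw [b_fold_getD, if_pos hul]
  refine congrArg (fun l => (u, l)) ?_
  -- both per-user policy lists are sorts of Nodup lists with the same members
  unfold pvBVal
  refine PySem.List.sorted_eq_sorted_of_perm _ _ _ (fun a b h => h) ?_
  refine (List.perm_ext_iff_of_nodup ?_ ?_).2 ?_
  · exact p5_nodup _ _ _ _ _ hc2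
      (p2_getD_nodup _ _ _ (by rw [pvPhase1_getD]; exact List.nodup_nil))
  · exact b_nodup_groups _ _ _ _ (b_nodup_foldl_addIf _ _ _ List.nodup_nil)
  · intro y
    rw [p5_getD_mem _ _ _ _ _ hc2, p2_getD_mem, b_mem_groups, b_mem_foldl_addIf, pvPhase1_getD]
    have hc1 : (pvPhase1 ul).contains u = true := by
      rw [PySem.Dict.contains_eq_decide_mem_keys, pvPhase1_keys]
      simpa [PySem.Set.mem_ofList] using hul
    have hbridge : (∃ g ∈ (pvRevmap (PySem.Dict.ofList gum).items).getD u [],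
          y ∈ (pvRevmap (PySem.Dict.ofList gpm).items).getD g []) ↔
        ∃ gr ∈ (PySem.Dict.ofList gum).items, u ∈ gr.2 ∧
          ∃ pp ∈ (PySem.Dict.ofList gpm).items, gr.1 ∈ pp.2 ∧ y = pp.1 := by
      constructor
      · rintro ⟨g, hg, hy⟩
        rcases (pv_mem_revmap _ _ _).1 hg with ⟨gr, hgr, hmem, rfl⟩
        rcases (pv_mem_revmap _ _ _).1 hy with ⟨pp, hpp, hmem2, rfl⟩
        exact ⟨gr, hgr, hmem, pp, hpp, hmem2, rfl⟩
      · rintro ⟨gr, hgr, hmem, pp, hpp, hmem2, rfl⟩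
        exact ⟨gr.1, (pv_mem_revmap _ _ _).2 ⟨gr, hgr, hmem, rfl⟩,
          (pv_mem_revmap _ _ _).2 ⟨pp, hpp, hmem2, rfl⟩⟩
    rw [hbridge]
    simp [hc1, hul]
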